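-- pv_equiv track=rewrite | github.com/eliottcassidy2000/math | 04-computation/c6_from_trace.py | c6_via_trace
-- ===== SOURCE A (Python) =====
-- from math import comb
--
-- def c6_via_trace(T):
--     """Compute c_6(T) = (tr(A^6) - 3*c_3^2) / 6 in O(n^3)."""
--     n = len(T)
--     if n < 6:
--         return 0
--     # c_3 via Moon's formula: O(n^2)
--     scores = [sum(T[i]) for i in range(n)]
--     c3 = comb(n, 3) - sum(comb(s, 2) for s in scores)
--
--     # tr(A^6) via matrix multiplication: O(n^3)
--     A2 = [[sum(T[i][k]*T[k][j] for k in range(n)) for j in range(n)] for i in range(n)]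
--     A3 = [[sum(A2[i][k]*T[k][j] for k in range(n)) for j in range(n)] for i in range(n)]
--     A6 = [[sum(A3[i][k]*A3[k][j] for k in range(n)) for j in range(n)] for i in range(n)]
--     tr6 = sum(A6[i][i] for i in range(n))
--
--     correction = 3 * c3 * c3
--     assert (tr6 - correction) % 6 == 0, f"tr6={tr6}, correction={correction}, remainder={(tr6 - correction) % 6}"
--     return (tr6 - correction) // 6
-- ===== SOURCE B (Python) =====
-- def c6_via_trace(T):
--     """Count 6-cycles via tr(A^6) = tr((A^2)^3): build only A^2 and take a
--     triple-loop trace of its cube, never materialising A^3 or A^6; binomials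
--     in closed form."""
--     n = len(T)
--     if n < 6:
--         return 0
--     scores = [sum(row) for row in T]
--     c3 = n * (n - 1) * (n - 2) // 6 - sum(s * (s - 1) // 2 for s in scores)
--     A2 = [[sum(T[i][k] * T[k][j] for k in range(n)) for j in range(n)] for i in range(n)]
--     tr6 = 0
--     for i in range(n):
--         for j in range(n):
--             for k in range(n):
--                 tr6 += A2[i][j] * A2[j][k] * A2[k][i]
--     return (tr6 - 3 * c3 * c3) // 6
-- ===== Notes on version B (the rewrite author's own statement) =====
-- stated objective: alternative
-- what changed: B computes tr(A^6) as the trace of (A^2)^3 by a direct triple loop over the single matrix A^2, never building A^3 or A^6 (A builds A^2, A^3 and the full A^6 and sums its diagonal), and replaces math.comb with closed-form binomials; it keeps the same O(n^3) cost but a smaller memory/constant footprint. Pre_ excludes n>=6 inputs that are not 0/1 tournaments, the function's stated domain, where A's assert/comb/indexing may raise (on the rare such inputs where the divisibility accidentally holds A still returns and B returns the same value, e.g. the all-zero 6x6 matrix).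
import Mathlib
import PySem

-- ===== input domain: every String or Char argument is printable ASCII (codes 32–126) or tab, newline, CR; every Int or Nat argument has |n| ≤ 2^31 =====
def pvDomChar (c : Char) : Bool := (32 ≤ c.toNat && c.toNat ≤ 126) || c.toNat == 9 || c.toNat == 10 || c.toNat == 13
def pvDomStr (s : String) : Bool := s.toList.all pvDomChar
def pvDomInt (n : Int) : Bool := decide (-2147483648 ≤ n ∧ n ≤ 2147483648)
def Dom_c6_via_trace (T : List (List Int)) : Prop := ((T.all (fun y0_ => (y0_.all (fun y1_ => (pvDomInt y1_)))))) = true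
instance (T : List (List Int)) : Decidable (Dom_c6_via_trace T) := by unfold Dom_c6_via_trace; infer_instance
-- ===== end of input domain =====

-- B computes tr(A^6) as the trace of (A^2)^3 by a direct triple loop over A^2 alone
-- (never building A^3 or A^6) and uses closed-form binomials; same O(n^3) cost, an
-- alternative decomposition.

-- shared small helpers (both Pythons index rows/entries and sum over range(n) the same way)
def pyRow (T : List (List Int)) (i : Nat) : List Int := T.getD i []
def pyEnt (T : List (List Int)) (i j : Nat) : Int := (pyRow T i).getD j 0
def sumRange (n : Nat) (f : Nat → Int) : Int := (List.range n).foldl (fun a k => a + f k) 0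
def mkMat (n : Nat) (f : Nat → Nat → Int) : List (List Int) := (List.range n).map (fun i => (List.range n).map (f i))

-- ===== PORT A =====
-- A's assert is not representable in an Int-valued port; Pre_ below restricts to
-- inputs on which the Python A returns normally (assert passes, comb's arguments
-- are ≥ 0, indexing is in range).
def c6_via_trace (T : List (List Int)) : Int :=
  let n := T.length
  if n < 6 then 0 else
    let scores := (List.range n).map (fun i => (pyRow T i).foldl (· + ·) 0)
    let c3 : Int := (n.choose 3 : Int) - scores.foldl (fun a s => a + ((s.toNat.choose 2 : Nat) : Int)) 0
    let A2 := mkMat n (fun i j => sumRange n (fun k => pyEnt T i k * pyEnt T k j))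
    let A3 := mkMat n (fun i j => sumRange n (fun k => pyEnt A2 i k * pyEnt T k j))
    let A6 := mkMat n (fun i j => sumRange n (fun k => pyEnt A3 i k * pyEnt A3 k j))
    let tr6 := sumRange n (fun i => pyEnt A6 i i)
    let correction := 3 * c3 * c3
    PySem.Int.floordiv (tr6 - correction) 6

-- ===== PORT B =====
def c6_via_trace_alt (T : List (List Int)) : Int :=
  let n := T.length
  if n < 6 then 0 else
    let scores := T.map (fun row => row.foldl (· + ·) 0)
    let c3 : Int := PySem.Int.floordiv ((n : Int) * ((n : Int) - 1) * ((n : Int) - 2)) 6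
      - scores.foldl (fun a s => a + PySem.Int.floordiv (s * (s - 1)) 2) 0
    let A2 := mkMat n (fun i j => sumRange n (fun k => pyEnt T i k * pyEnt T k j))
    let tr6 := sumRange n (fun i => sumRange n (fun j => sumRange n (fun k =>
        pyEnt A2 i j * pyEnt A2 j k * pyEnt A2 k i)))
    PySem.Int.floordiv (tr6 - 3 * c3 * c3) 6

-- ===== PRECONDITION & SPEC =====
-- Pre_ restricts n ≥ 6 inputs to genuine 0/1 tournaments — the function's stated
-- domain; outside it A's assert may raise AssertionError, comb may raise
-- ValueError on a negative row sum, and short rows raise IndexError (on the rare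
-- non-tournament inputs where A still happens to return, B returns the same value).
def Pre_c6_via_trace (T : List (List Int)) : Prop :=
  T.length < 6 ∨
  ((∀ i < T.length, (T.getD i []).length = T.length) ∧
   (∀ i < T.length, ∀ j < T.length,
     (i = j → pyEnt T i j = 0) ∧
     (i ≠ j → (pyEnt T i j = 0 ∨ pyEnt T i j = 1) ∧ pyEnt T i j + pyEnt T j i = 1)))
instance (T : List (List Int)) : Decidable (Pre_c6_via_trace T) := by
  unfold Pre_c6_via_trace; infer_instance

def pvWitness_c6_via_trace : List (List Int) :=
  [[0,1,1,1,1,1],[0,0,1,1,1,1],[0,0,0,1,1,1],[0,0,0,0,1,1],[0,0,0,0,0,1],[0,0,0,0,0,0]]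

def Spec_c6_via_trace (T : List (List Int)) (out : Int) : Prop := out = c6_via_trace_alt T
instance (T : List (List Int)) (out : Int) : Decidable (Spec_c6_via_trace T out) := by unfold Spec_c6_via_trace; infer_instance

-- ===== CLAIM (what is proved, stated in full; the proofs are below) =====
def Claim_equal_c6_via_trace : Prop := ∀ (T : List (List Int)), Dom_c6_via_trace T → Pre_c6_via_trace T → Spec_c6_via_trace T (c6_via_trace T)

-- ===== LEMMAS AND PROOFS =====

-- sumRange is the Finset.range sum
theorem sumRange_eq (n : Nat) (f : Nat → Int) :
    sumRange n f = ∑ i ∈ Finset.range n, f i := by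
  simp only [sumRange, PySem.List.foldl_add, zero_add]
  rfl

-- entries of a matrix built by mkMat
theorem pyEnt_mkMat (n : Nat) (f : Nat → Nat → Int) {i j : Nat} (hi : i < n) (hj : j < n) :
    pyEnt (mkMat n f) i j = f i j := by
  simp [pyEnt, pyRow, mkMat, List.getD_eq_getElem?_getD, hi, hj]

-- A's scores list equals B's
theorem scores_eq (T : List (List Int)) :
    (List.range T.length).map (fun i => (pyRow T i).foldl (· + ·) 0)
      = T.map (fun row => row.foldl (· + ·) 0) := by
  apply List.ext_getElem
  · simp
  · intro i hi _
    have hi' : i < T.length := by simpa using hi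
    simp [pyRow, List.getD_eq_getElem?_getD, List.getElem?_eq_getElem hi']

-- a fold of nonnegative integers is nonnegative
theorem foldl_add_nonneg (l : List Int) (a : Int) (ha : 0 ≤ a)
    (h : ∀ x ∈ l, 0 ≤ x) : 0 ≤ l.foldl (· + ·) a := by
  induction l generalizing a with
  | nil => simpa using ha
  | cons x xs ih =>
    exact ih (a + x) (by have := h x (by simp); omega) (fun y hy => h y (by simp [hy]))

-- closed form for comb(s, 2) on nonnegative s
theorem comb2_eq (s : Int) (hs : 0 ≤ s) :
    ((s.toNat.choose 2 : Nat) : Int) = PySem.Int.floordiv (s * (s - 1)) 2 := by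
  obtain ⟨m, rfl⟩ := Int.eq_ofNat_of_zero_le hs
  have key : ∀ m : Nat, ((m.choose 2 : Nat) : Int) * 2 = (m : Int) * ((m : Int) - 1) := by
    intro m
    induction m with
    | zero => simp
    | succ k ih =>
      rw [Nat.choose_succ_succ]
      push_cast
      push_cast at ih
      have : ((k.choose 1 : Nat) : Int) = k := by simp
      nlinarith [ih, this]
  rw [PySem.Int.floordiv_eq_ediv_of_pos (by norm_num), Int.toNat_natCast, ← key m,
      Int.mul_ediv_cancel _ (by norm_num)]

-- closed form for comb(n, 3)
theorem comb3_eq (n : Nat) :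
    ((n.choose 3 : Nat) : Int) = PySem.Int.floordiv ((n : Int) * ((n : Int) - 1) * ((n : Int) - 2)) 6 := by
  have key : ∀ m : Nat, ((m.choose 3 : Nat) : Int) * 6 = (m : Int) * ((m : Int) - 1) * ((m : Int) - 2) := by
    intro m
    induction m with
    | zero => simp
    | succ k ih =>
      rw [Nat.choose_succ_succ]
      push_cast
      push_cast at ih
      have h2 : ((k.choose 2 : Nat) : Int) * 2 = (k : Int) * ((k : Int) - 1) := by
        have := comb2_eq (k : Int) (by positivity)
        rw [PySem.Int.floordiv_eq_ediv_of_pos (by norm_num)] at this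
        have hdvd : (2 : Int) ∣ (k : Int) * ((k : Int) - 1) := Int.even_mul_pred_self k |>.two_dvd
        obtain ⟨c, hc⟩ := hdvd
        simp only [Int.toNat_natCast] at this
        rw [hc, Int.mul_ediv_cancel_left _ (by norm_num)] at this
        rw [hc]; omega
      nlinarith [ih, h2]
  rw [PySem.Int.floordiv_eq_ediv_of_pos (by norm_num), ← key n,
      Int.mul_ediv_cancel _ (by norm_num)]

-- the two c3 computations agree when every score is nonnegative
theorem c3_eq (T : List (List Int))
    (hnn : ∀ s ∈ T.map (fun row => row.foldl (· + ·) 0), 0 ≤ s) :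
    ((T.length.choose 3 : Nat) : Int)
        - ((List.range T.length).map (fun i => (pyRow T i).foldl (· + ·) 0)).foldl
            (fun a s => a + ((s.toNat.choose 2 : Nat) : Int)) 0
      = PySem.Int.floordiv ((T.length : Int) * ((T.length : Int) - 1) * ((T.length : Int) - 2)) 6
        - (T.map (fun row => row.foldl (· + ·) 0)).foldl
            (fun a s => a + PySem.Int.floordiv (s * (s - 1)) 2) 0 := by
  rw [scores_eq, comb3_eq]
  congr 1
  exact PySem.List.foldl_congr_mem _ _ _ _ (fun a s hs => by rw [comb2_eq s (hnn s hs)])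

-- tr(A^6) computed as tr((A^3)^2) (A's way) equals tr((A^2)^3) (B's way) — for ANY T
theorem tr6_eq (T : List (List Int)) (n : Nat) :
    sumRange n (fun i => pyEnt
        (mkMat n (fun i j => sumRange n (fun k =>
          pyEnt (mkMat n (fun i j => sumRange n (fun k =>
            pyEnt (mkMat n (fun i j => sumRange n (fun k => pyEnt T i k * pyEnt T k j))) i k * pyEnt T k j))) i k
          * pyEnt (mkMat n (fun i j => sumRange n (fun k =>
            pyEnt (mkMat n (fun i j => sumRange n (fun k => pyEnt T i k * pyEnt T k j))) i k * pyEnt T k j))) k j)))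
        i i)
      = sumRange n (fun i => sumRange n (fun j => sumRange n (fun k =>
          pyEnt (mkMat n (fun i j => sumRange n (fun k => pyEnt T i k * pyEnt T k j))) i j
          * pyEnt (mkMat n (fun i j => sumRange n (fun k => pyEnt T i k * pyEnt T k j))) j k
          * pyEnt (mkMat n (fun i j => sumRange n (fun k => pyEnt T i k * pyEnt T k j))) k i))) := by
  set A2L := mkMat n (fun i j => sumRange n (fun k => pyEnt T i k * pyEnt T k j)) with hA2
  set A3L := mkMat n (fun i j => sumRange n (fun k => pyEnt A2L i k * pyEnt T k j)) with hA3
  set A6L := mkMat n (fun i j => sumRange n (fun k => pyEnt A3L i k * pyEnt A3L k j)) with hA6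
  set M : Matrix (Fin n) (Fin n) Int := Matrix.of (fun i j : Fin n => pyEnt T i j) with hM
  have hsum : ∀ f : Nat → Int, sumRange n f = ∑ i : Fin n, f i := by
    intro f; rw [sumRange_eq, ← Fin.sum_univ_eq_sum_range]
  have e2 : ∀ i j : Fin n, pyEnt A2L i j = (M * M) i j := by
    intro i j
    rw [hA2, pyEnt_mkMat _ _ i.isLt j.isLt, hsum, Matrix.mul_apply]; rfl
  have e3 : ∀ i j : Fin n, pyEnt A3L i j = (M * M * M) i j := by
    intro i j
    rw [hA3, pyEnt_mkMat _ _ i.isLt j.isLt, hsum, Matrix.mul_apply]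
    exact Finset.sum_congr rfl (fun k _ => by rw [e2]; rfl)
  have e6 : ∀ i j : Fin n, pyEnt A6L i j = ((M * M * M) * (M * M * M)) i j := by
    intro i j
    rw [hA6, pyEnt_mkMat _ _ i.isLt j.isLt, hsum, Matrix.mul_apply]
    exact Finset.sum_congr rfl (fun k _ => by rw [e3, e3])
  have rhs_eq : ∀ i : Fin n,
      sumRange n (fun j => sumRange n (fun k => pyEnt A2L i j * pyEnt A2L j k * pyEnt A2L k i))
        = ((M * M) * ((M * M) * (M * M))) i i := by
    intro i
    have inner : ∀ j : Fin n,
        sumRange n (fun k => pyEnt A2L i j * pyEnt A2L j k * pyEnt A2L k i)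
          = (M * M) i j * ((M * M) * (M * M)) j i := by
      intro j
      rw [hsum,
          show ((M * M) * (M * M)) j i = ∑ k : Fin n, (M * M) j k * (M * M) k i
            from Matrix.mul_apply,
          Finset.mul_sum]
      refine Finset.sum_congr rfl (fun k _ => ?_)
      rw [e2 i j, e2 j k, e2 k i]; ring
    rw [hsum,
        show ((M * M) * ((M * M) * (M * M))) i i
            = ∑ j : Fin n, (M * M) i j * ((M * M) * (M * M)) j i from Matrix.mul_apply]
    exact Finset.sum_congr rfl (fun j _ => inner j)
  rw [hsum, hsum]
  calc (∑ i : Fin n, pyEnt A6L i i)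
      = ∑ i : Fin n, ((M * M * M) * (M * M * M)) i i :=
        Finset.sum_congr rfl (fun i _ => e6 i i)
    _ = ∑ i : Fin n, ((M * M) * ((M * M) * (M * M))) i i := by
        rw [show (M * M * M) * (M * M * M) = (M * M) * ((M * M) * (M * M)) by
          simp only [Matrix.mul_assoc]]
    _ = ∑ i : Fin n, sumRange n (fun j => sumRange n (fun k =>
          pyEnt A2L i j * pyEnt A2L j k * pyEnt A2L k i)) :=
        Finset.sum_congr rfl (fun i _ => (rhs_eq i).symm)

-- row sums are nonnegative on a tournament
theorem scores_nonneg (T : List (List Int))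
    (hlen : ∀ i < T.length, (T.getD i []).length = T.length)
    (htour : ∀ i < T.length, ∀ j < T.length,
      (i = j → pyEnt T i j = 0) ∧
      (i ≠ j → (pyEnt T i j = 0 ∨ pyEnt T i j = 1) ∧ pyEnt T i j + pyEnt T j i = 1)) :
    ∀ s ∈ T.map (fun row => row.foldl (· + ·) 0), 0 ≤ s := by
  intro s hs
  rw [List.mem_map] at hs
  obtain ⟨row, hrow, rfl⟩ := hs
  obtain ⟨i, hi, hTi⟩ := List.mem_iff_getElem.mp hrow
  refine foldl_add_nonneg _ _ le_rfl (fun x hx => ?_)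
  obtain ⟨j, hj, hxj⟩ := List.mem_iff_getElem.mp hx
  have hgetD : T.getD i [] = row := by rw [List.getD_eq_getElem?_getD, List.getElem?_eq_getElem hi, hTi]; rfl
  have hjlt : j < T.length := by
    have := hlen i hi; rw [hgetD] at this; omega
  have hx' : pyEnt T i j = x := by
    simp only [pyEnt, pyRow, hgetD]
    rw [List.getD_eq_getElem?_getD, List.getElem?_eq_getElem hj, hxj]; rfl
  rcases eq_or_ne i j with h | h
  · have := (htour i hi j hjlt).1 (by omega); omega
  · have := ((htour i hi j hjlt).2 h).1; omega

-- ===== VERDICT (by name: the statement is the Claim_ definition above) =====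
theorem c6_via_trace_spec : Claim_equal_c6_via_trace := by
  intro T _ hPre
  unfold Spec_c6_via_trace c6_via_trace c6_via_trace_alt
  by_cases h : T.length < 6
  · simp [h]
  · simp only [if_neg h]
    rcases hPre with h6 | ⟨hlen, htour⟩
    · exact absurd h6 h
    have hc3 := c3_eq T (scores_nonneg T hlen htour)
    have htr := tr6_eq T T.length
    rw [hc3, htr]
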